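-- pv_equiv track=rewrite | github.com/juakiv/aoc | days/day09.py | find_first_fitting_gap
-- ===== SOURCE A (Python) =====
-- def find_first_fitting_gap(uncompressed_list: list[str], file_length: int) -> int | None:
--     for i in range(len(uncompressed_list)):
--         if uncompressed_list[i] == ".":
--             gap_length = 1
--             while i + gap_length < len(uncompressed_list) and uncompressed_list[i + gap_length] == ".":
--                 gap_length += 1
--             if gap_length >= file_length:
--                 return i
--     return None
-- ===== SOURCE B (Python) =====
-- def find_first_fitting_gap(uncompressed_list: list[str], file_length: int) -> int | None:
--     run_start = None
--     count = 0
--     for i, c in enumerate(uncompressed_list):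
--         if c == ".":
--             if count == 0:
--                 run_start = i
--             count += 1
--             if count >= file_length:
--                 return run_start
--         else:
--             count = 0
--     return None
-- ===== Notes on version B (the rewrite author's own statement) =====
-- stated objective: alternative
-- what changed: Replaces the restart-at-every-dot scan with nested gap recount by a single left-to-right pass maintaining the current dot-run start and length, returning the run start as soon as the run reaches file_length.
import Mathlib
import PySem

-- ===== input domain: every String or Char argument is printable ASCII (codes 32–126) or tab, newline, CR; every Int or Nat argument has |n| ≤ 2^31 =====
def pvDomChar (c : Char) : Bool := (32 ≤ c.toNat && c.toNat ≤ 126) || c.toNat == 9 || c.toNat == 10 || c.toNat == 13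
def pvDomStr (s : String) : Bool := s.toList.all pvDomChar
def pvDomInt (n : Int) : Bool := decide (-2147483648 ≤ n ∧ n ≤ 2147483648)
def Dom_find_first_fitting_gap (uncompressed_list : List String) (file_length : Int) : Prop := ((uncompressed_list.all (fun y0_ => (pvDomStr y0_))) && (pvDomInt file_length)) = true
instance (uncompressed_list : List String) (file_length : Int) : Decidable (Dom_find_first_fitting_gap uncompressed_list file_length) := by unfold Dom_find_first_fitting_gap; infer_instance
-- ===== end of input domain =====

-- B replaces A's restart-at-every-dot scan (with its inner gap-recount loop) by a single
-- left-to-right pass tracking the current dot-run start and length (objective: alternative).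

-- ===== PORT A =====
-- inner `while i + gap_length < len and list[i+gap_length] == "."` loop of A
def pvWhileGap (xs : List String) (i : Nat) (g : Nat) : Nat :=
  if i + g < xs.length ∧ xs.getD (i + g) "" = "." then
    pvWhileGap xs i (g + 1)
  else g
termination_by xs.length - (i + g)
decreasing_by omega

-- outer `for i in range(len(uncompressed_list))` loop of A
def pvALoop (xs : List String) (fl : Int) (i : Nat) : Option Int :=
  if i < xs.length then
    if xs.getD i "" = "." then
      if (pvWhileGap xs i 1 : Int) ≥ fl then some (i : Int)
      else pvALoop xs fl (i + 1)
    else pvALoop xs fl (i + 1)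
  else none
termination_by xs.length - i
decreasing_by all_goals omega

def find_first_fitting_gap (uncompressed_list : List String) (file_length : Int) : Option Int :=
  pvALoop uncompressed_list file_length 0

-- ===== PORT B =====
-- B's single `for i, c in enumerate(...)` pass with state (run_start, count)
def pvBLoop (fl : Int) : List String → Nat → Option Int → Int → Option Int
  | [], _, _, _ => none
  | c :: rest, i, rs, count =>
    if c = "." then
      let rs' := if count = 0 then some (i : Int) else rs
      if count + 1 ≥ fl then rs'
      else pvBLoop fl rest (i + 1) rs' (count + 1)
    else pvBLoop fl rest (i + 1) rs 0

def find_first_fitting_gap_alt (uncompressed_list : List String) (file_length : Int) : Option Int :=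
  pvBLoop file_length uncompressed_list 0 none 0

-- ===== PRECONDITION & SPEC =====
def Spec_find_first_fitting_gap (uncompressed_list : List String) (file_length : Int) (out : Option Int) : Prop := out = find_first_fitting_gap_alt uncompressed_list file_length
instance (uncompressed_list : List String) (file_length : Int) (out : Option Int) : Decidable (Spec_find_first_fitting_gap uncompressed_list file_length out) := by unfold Spec_find_first_fitting_gap; infer_instance

-- ===== CLAIM (what is proved, stated in full; the proofs are below) =====
def Claim_equal_find_first_fitting_gap : Prop := ∀ (uncompressed_list : List String) (file_length : Int), Dom_find_first_fitting_gap uncompressed_list file_length → Spec_find_first_fitting_gap uncompressed_list file_length (find_first_fitting_gap uncompressed_list file_length)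

-- ===== LEMMAS AND PROOFS =====

-- length of the maximal dot run starting at position i
def pvRunLen (xs : List String) (i : Nat) : Nat :=
  if i < xs.length ∧ xs.getD i "" = "." then pvRunLen xs (i + 1) + 1 else 0
termination_by xs.length - i
decreasing_by omega

theorem pvRunLen_le (xs : List String) (i : Nat) : pvRunLen xs i ≤ xs.length - i := by
  rw [pvRunLen]
  split
  · have := pvRunLen_le xs (i + 1)
    omega
  · omega
termination_by xs.length - i
decreasing_by omega

theorem pvWhileGap_eq (xs : List String) (i g : Nat) :
    pvWhileGap xs i g = g + pvRunLen xs (i + g) := by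
  rw [pvWhileGap, pvRunLen]
  split
  · rw [pvWhileGap_eq xs i (g + 1)]
    have : i + (g + 1) = i + g + 1 := by omega
    rw [this]; omega
  · omega
termination_by xs.length - (i + g)
decreasing_by omega

-- A skips through a too-short dot run
theorem pvALoop_skip (xs : List String) (fl : Int) (i : Nat)
    (h : (pvRunLen xs i : Int) < fl) :
    pvALoop xs fl i = pvALoop xs fl (i + pvRunLen xs i) := by
  by_cases hc : i < xs.length ∧ xs.getD i "" = "."
  · have hL : pvRunLen xs i = pvRunLen xs (i + 1) + 1 := by
      rw [pvRunLen, if_pos hc]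
    have hlt : (pvRunLen xs (i + 1) : Int) < fl := by omega
    rw [pvALoop, if_pos hc.1, if_pos hc.2]
    have hwg : (pvWhileGap xs i 1 : Int) = (pvRunLen xs i : Int) := by
      rw [pvWhileGap_eq]; omega
    have hng : ¬ ((pvWhileGap xs i 1 : Int) ≥ fl) := by omega
    rw [if_neg hng, pvALoop_skip xs fl (i + 1) hlt]
    congr 1
    omega
  · have h0 : pvRunLen xs i = 0 := by rw [pvRunLen, if_neg hc]
    rw [h0, Nat.add_zero]
termination_by pvRunLen xs i
decreasing_by rw [hL]; omega

-- rs is irrelevant while count = 0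
theorem pvBLoop_rs_irrel (fl : Int) (l : List String) (i : Nat) (rs rs' : Option Int) :
    pvBLoop fl l i rs 0 = pvBLoop fl l i rs' 0 := by
  induction l generalizing i with
  | nil => rfl
  | cons c rest ih =>
    rw [pvBLoop, pvBLoop]
    by_cases hc : c = "."
    · simp [hc]
    · simp only [hc, if_false]
      exact ih (i + 1)

theorem pvGetD_dot_lt (xs : List String) (k : Nat) (h : xs.getD k "" = ".") : k < xs.length := by
  by_contra hk
  rw [List.getD_eq_default] at h
  · exact absurd h (by decide)
  · omega

-- the run starting at s extends through the all-dot block [s, j)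
theorem pvRunLen_add (xs : List String) (s j : Nat) (hsj : s ≤ j)
    (hdots : ∀ k, s ≤ k → k < j → xs.getD k "" = ".") :
    pvRunLen xs s = (j - s) + pvRunLen xs j := by
  rcases Nat.eq_or_lt_of_le hsj with h | h
  · subst h; omega
  · have hd : xs.getD s "" = "." := hdots s (le_refl s) h
    have hlen : s < xs.length := pvGetD_dot_lt xs s hd
    have : pvRunLen xs s = pvRunLen xs (s + 1) + 1 := by
      rw [pvRunLen, if_pos ⟨hlen, hd⟩]
    rw [this, pvRunLen_add xs (s + 1) j (by omega) (fun k hk1 hk2 => hdots k (by omega) hk2)]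
    omega
termination_by j - s
decreasing_by omega

-- main invariant: B scanning at position j, inside a dot run that began at s
-- (count = j - s, all of [s, j) dots, run so far shorter than fl), equals A restarted at s
theorem pvLoop_eq (xs : List String) (fl : Int) (j s : Nat) (hsj : s ≤ j)
    (hcase : j = s ∨ ((j : Int) - s) < fl)
    (hdots : ∀ k, s ≤ k → k < j → xs.getD k "" = ".") :
    pvBLoop fl (xs.drop j) j (some (s : Int)) ((j : Int) - s) = pvALoop xs fl s := by
  by_cases hj : j < xs.length
  · have hdrop : xs.drop j = xs.getD j "" :: xs.drop (j + 1) := by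
      rw [List.getD_eq_getElem xs "" hj]
      exact (List.getElem_cons_drop hj).symm
    rw [hdrop, pvBLoop]
    by_cases hc : xs.getD j "" = "."
    · simp only [hc, if_true]
      have hdots' : ∀ k, s ≤ k → k < j + 1 → xs.getD k "" = "." := by
        intro k hk1 hk2
        rcases Nat.lt_or_ge k j with h | h
        · exact hdots k hk1 h
        · have : k = j := by omega
          rw [this]; exact hc
      have hrs' : (if ((j : Int) - s) = 0 then some ((j : Nat) : Int) else some (s : Int)) = some (s : Int) := by
        split
        · have : j = s := by omega
          rw [this]
        · rfl
      rw [hrs']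
      by_cases hret : ((j : Int) - s) + 1 ≥ fl
      · simp only [hret, if_true]
        -- A at s sees a dot with run length ≥ j + 1 - s ≥ fl
        have hds : xs.getD s "" = "." := hdots' s (le_refl s) (by omega)
        have hs : s < xs.length := pvGetD_dot_lt xs s hds
        have hrl : pvRunLen xs s = (j + 1 - s) + pvRunLen xs (j + 1) :=
          pvRunLen_add xs s (j + 1) (by omega) hdots'
        rw [pvALoop, if_pos hs, if_pos hds]
        have hwg : pvWhileGap xs s 1 = pvRunLen xs s := by
          rw [pvWhileGap_eq]
          conv_rhs => rw [pvRunLen, if_pos ⟨hs, hds⟩]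
          omega
        have hge : (pvWhileGap xs s 1 : Int) ≥ fl := by
          rw [hwg, hrl]; push_cast; omega
        rw [if_pos hge]
      · simp only [hret, if_false]
        have : ((j : Int) - s) + 1 = ((j + 1 : Nat) : Int) - s := by push_cast; omega
        rw [this]
        exact pvLoop_eq xs fl (j + 1) s (by omega) (by right; push_cast; omega) hdots'
    · simp only [hc, if_false]
      -- B leaves the run with a fresh state; A skips the whole run [s, j) and the non-dot at j
      have hB : pvBLoop fl (xs.drop (j + 1)) (j + 1) (some (s : Int)) 0
          = pvALoop xs fl (j + 1) := by
        rw [pvBLoop_rs_irrel fl (xs.drop (j + 1)) (j + 1) (some (s : Int)) (some ((j + 1 : Nat) : Int))]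
        have := pvLoop_eq xs fl (j + 1) (j + 1) (le_refl _) (Or.inl rfl) (by intro k h1 h2; omega)
        simpa using this
      rw [hB]
      have hAj : pvALoop xs fl j = pvALoop xs fl (j + 1) := by
        rw [pvALoop, if_pos hj, if_neg hc]
      rcases hcase with h | h
      · subst h
        exact hAj.symm
      · have hrlj : pvRunLen xs j = 0 := by rw [pvRunLen, if_neg (by exact fun hh => hc hh.2)]
        have hrl : pvRunLen xs s = j - s := by
          rw [pvRunLen_add xs s j hsj hdots, hrlj]
          omega
        have hlt : (pvRunLen xs s : Int) < fl := by rw [hrl]; omega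
        rw [pvALoop_skip xs fl s hlt, hrl, show s + (j - s) = j by omega, hAj]

  · -- j ≥ length: B's list is empty, A runs off the end of an all-dot tail
    have hdrop : xs.drop j = [] := List.drop_eq_nil_of_le (by omega)
    rw [hdrop, pvBLoop]
    rcases Nat.eq_or_lt_of_le hsj with h | h
    · subst h
      rw [pvALoop, if_neg hj]
    · -- s < j: dots on [s, j), so j ≤ length forces j = length
      have hjlen : j ≤ xs.length := by
        by_contra hgt
        rcases Nat.lt_or_ge s xs.length with hs | hs
        · exact absurd (pvGetD_dot_lt xs xs.length (hdots _ (by omega) (by omega))) (by omega)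
        · exact absurd (pvGetD_dot_lt xs s (hdots s (le_refl s) h)) (by omega)
      have hjeq : j = xs.length := by omega
      have hrl : pvRunLen xs s = j - s := by
        rw [pvRunLen_add xs s j hsj hdots]
        have hz : pvRunLen xs j = 0 := by
          rw [pvRunLen, if_neg (by omega)]
        omega
      have hlt : (pvRunLen xs s : Int) < fl := by
        rcases hcase with h' | h'
        · omega
        · rw [hrl]; omega
      rw [pvALoop_skip xs fl s hlt, hrl]
      rw [pvALoop, if_neg (show ¬ s + (j - s) < xs.length by omega)]
termination_by xs.length - j
decreasing_by all_goals omega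

-- ===== VERDICT (by name: the statement is the Claim_ definition above) =====
theorem find_first_fitting_gap_spec : Claim_equal_find_first_fitting_gap := by
  intro xs fl _
  unfold Spec_find_first_fitting_gap find_first_fitting_gap find_first_fitting_gap_alt
  rw [pvBLoop_rs_irrel fl xs 0 none (some ((0 : Nat) : Int))]
  have := pvLoop_eq xs fl 0 0 (le_refl 0) (Or.inl rfl) (by intro k h1 h2; omega)
  simp only [List.drop_zero] at this
  rw [← this]
  norm_num
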